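-- pv_equiv track=rewrite | github.com/scnkera/columns-problem | columns.py | top_column
-- ===== SOURCE A (Python) =====
-- def top_column(matrix):
--   best_sum = None
--   best_col = None
--
--   for col in range(len(matrix[0])):
--     total = 0
--     for row in range(len(matrix)):
--       total += matrix[row][col]
--
--       if best_sum is None or total > best_sum:
--         best_sum = total
--         best_col = col
--
--   return best_col
-- ===== SOURCE B (Python) =====
-- def top_column(matrix):
--     if not matrix[0]:
--         return None
--     # row-major single pass: vector of running column sums and vector of
--     # per-column maxima, updated row by row; argmax at the end.
--     sums = list(matrix[0])
--     bests = list(sums)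
--     for row in matrix[1:]:
--         sums = [s + x for s, x in zip(sums, row)]
--         bests = [max(b, s) for b, s in zip(bests, sums)]
--     return bests.index(max(bests))
-- ===== Notes on version B (the rewrite author's own statement) =====
-- stated objective: alternative
-- what changed: A traverses column-major with nested index loops and a scalar running total, comparing against the best inside the inner loop; B traverses the matrix row-major in one pass over the rows, maintaining a vector of per-column running sums and a vector of per-column maxima (no inner per-column scan and no index arithmetic), then selects the answer by a final first-wins argmax over the maxima vector.
-- outside the precondition, e.g. on top_column([[]]): A returns None, B returns None
import Mathlib
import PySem

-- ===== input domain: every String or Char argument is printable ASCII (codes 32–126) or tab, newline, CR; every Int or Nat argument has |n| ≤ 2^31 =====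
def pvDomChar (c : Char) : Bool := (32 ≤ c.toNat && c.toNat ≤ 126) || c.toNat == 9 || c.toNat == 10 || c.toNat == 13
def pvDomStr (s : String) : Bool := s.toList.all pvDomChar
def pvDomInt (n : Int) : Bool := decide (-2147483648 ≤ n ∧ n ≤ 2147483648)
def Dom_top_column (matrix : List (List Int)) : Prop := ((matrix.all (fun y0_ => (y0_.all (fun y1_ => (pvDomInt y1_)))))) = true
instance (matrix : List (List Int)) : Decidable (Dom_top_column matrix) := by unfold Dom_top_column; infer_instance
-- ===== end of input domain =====

-- B replaces A's column-major nested index loops with scalar accumulators by a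
-- row-major single pass over the rows maintaining a vector of per-column running
-- sums and a vector of per-column maxima, then a final first-wins argmax; objective: alternative.

-- ===== PORT A =====
-- literal port of A: outer loop over column indices, inner loop over row indices,
-- state (total, best_sum, best_col) with None sentinels.
def top_column (matrix : List (List Int)) : Int :=
  let st := (PySem.List.pyRange 0 (((PySem.List.pyGet? matrix 0).getD []).length : Int) 1).foldl
    (fun (st : Option Int × Option Int) col =>
      let r := (PySem.List.pyRange 0 (matrix.length : Int) 1).foldl
        (fun (p : Int × Option Int × Option Int) row =>
          let total := p.1 + PySem.List.pyGetD (PySem.List.pyGetD matrix row []) col 0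
          match p.2.1 with
          | none => (total, some total, some col)
          | some b => if b < total then (total, some total, some col) else (total, some b, p.2.2))
        (0, st.1, st.2)
      (r.2.1, r.2.2))
    (none, none)
  st.2.getD 0

-- ===== PORT B =====
-- the body of B's `for row in matrix[1:]` loop: zip-truncating comprehensions
-- updating the running-sums vector and the per-column-maxima vector.
def stepB (p : List Int × List Int) (row : List Int) : List Int × List Int :=
  let sums := (p.1.zip row).map (fun q => q.1 + q.2)
  let bests := (p.2.zip sums).map (fun q => max q.1 q.2)
  (sums, bests)

def top_column_alt (matrix : List (List Int)) : Int :=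
  let row0 := (PySem.List.pyGet? matrix 0).getD []
  if row0.isEmpty then 0  -- B returns None here; excluded by Pre_
  else
    let p := (PySem.List.slice matrix (some 1) none).foldl stepB (row0, row0)
    (((PySem.List.index? p.2 ((PySem.List.max? p.2 (fun y => y)).getD 0)).getD 0 : Nat) : Int)

-- ===== PRECONDITION & SPEC =====
-- Pre_ excludes the empty matrix and ragged matrices with a row shorter than row 0
-- (A raises IndexError there), and matrices whose first row is empty, where A returns
-- None, which is not a value of the declared Int type.
def Pre_top_column (matrix : List (List Int)) : Prop :=
  matrix ≠ [] ∧ matrix.headD [] ≠ [] ∧ ∀ r ∈ matrix, (matrix.headD []).length ≤ r.length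
instance (matrix : List (List Int)) : Decidable (Pre_top_column matrix) := by
  unfold Pre_top_column; infer_instance

def pvWitness_top_column : List (List Int) := [[1, -2], [3, 4]]

def Spec_top_column (matrix : List (List Int)) (out : Int) : Prop := out = top_column_alt matrix
instance (matrix : List (List Int)) (out : Int) : Decidable (Spec_top_column matrix out) := by
  unfold Spec_top_column; infer_instance

-- ===== CLAIM (what is proved, stated in full; the proofs are below) =====
def Claim_equal_top_column : Prop := ∀ (matrix : List (List Int)), Dom_top_column matrix → Pre_top_column matrix → Spec_top_column matrix (top_column matrix)

-- ===== LEMMAS AND PROOFS =====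

-- reference: prefix sums from a running total t
def psFrom (t : Int) : List Int → List Int
  | [] => []
  | x :: xs => (t + x) :: psFrom (t + x) xs

-- max prefix sum of the column x :: xs starting from total t
def mps (t x : Int) (xs : List Int) : Int := (psFrom (t + x) xs).foldl max (t + x)

def mps? (t : Int) : List Int → Option Int
  | [] => none
  | x :: xs => some (mps t x xs)

-- first-wins argmax selection over (index, score) pairs
def selRef (b c0 : Int) : List (Int × Int) → Int × Int
  | [] => (b, c0)
  | (j, v) :: rest => if b < v then selRef v j rest else selRef b c0 rest

def pairsFrom (k : Int) : List Int → List (Int × Int)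
  | [] => []
  | v :: vs => (k, v) :: pairsFrom (k + 1) vs

lemma mps_cons (t x y : Int) (ys : List Int) :
    mps t x (y :: ys) = max (t + x) (mps (t + x) y ys) := by
  simp only [mps, psFrom, List.foldl_cons]
  rw [show max (t+x) ((psFrom (t+x+y) ys).foldl max (t+x+y))
        = (psFrom (t+x+y) ys).foldl max (max (t+x) (t+x+y)) from List.foldl_assoc.symm]

lemma mps_zero (x : Int) (xs : List Int) : mps 0 x xs = max x ((mps? x xs).getD x) := by
  cases xs with
  | nil => simp [mps, mps?, psFrom]
  | cons y ys =>
    have := mps_cons 0 x y ys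
    simpa [mps?] using this

-- A's inner-loop body, with the matrix entry abstracted as the value v
def stepA (j : Int) (p : Int × Option Int × Option Int) (v : Int) : Int × Option Int × Option Int :=
  match p.2.1 with
  | none => (p.1 + v, some (p.1 + v), some j)
  | some b => if b < p.1 + v then (p.1 + v, some (p.1 + v), some j) else (p.1 + v, some b, p.2.2)

lemma stepA_some (j : Int) (xs : List Int) : ∀ (t b : Int) (c : Option Int),
    xs.foldl (stepA j) (t, some b, c)
      = (t + xs.sum, some (max b ((mps? t xs).getD b)),
         if b < (mps? t xs).getD b then some j else c) := by
  induction xs with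
  | nil => intro t b c; simp [mps?]
  | cons x xs ih =>
    intro t b c
    rw [List.foldl_cons]
    by_cases hb : b < t + x
    · have h1 : stepA j (t, some b, c) x = (t + x, some (t + x), some j) := by
        simp [stepA, hb]
      rw [h1, ih]
      cases xs with
      | nil =>
        simp only [mps?, mps, psFrom, List.foldl_nil, List.sum_nil, List.sum_cons,
          Option.getD_none, Option.getD_some, add_zero]
        rw [max_self, if_pos hb, max_eq_right hb.le, lt_irrefl (t + x) |> if_neg]
      | cons y ys =>
        simp only [mps?, Option.getD_some, mps_cons, List.sum_cons, ite_self]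
        refine Prod.ext (by push_cast; ring) (Prod.ext ?_ ?_)
        · simp only
          rw [max_eq_right (le_max_of_le_left hb.le)]
        · simp only
          rw [if_pos (lt_of_lt_of_le hb (le_max_left _ _))]
    · have h1 : stepA j (t, some b, c) x = (t + x, some b, c) := by
        simp [stepA, hb]
      rw [h1, ih]
      cases xs with
      | nil =>
        simp only [mps?, mps, psFrom, List.foldl_nil, List.sum_nil, List.sum_cons,
          Option.getD_none, Option.getD_some, add_zero]
        rw [max_self, if_neg (lt_irrefl b), if_neg hb, max_eq_left (not_lt.mp hb)]
      | cons y ys =>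
        simp only [mps?, Option.getD_some, mps_cons, List.sum_cons]
        refine Prod.ext (by push_cast; ring) (Prod.ext ?_ ?_)
        · simp only
          congr 1
          rw [← max_assoc, max_eq_left (not_lt.mp hb)]
        · simp only
          simp [hb]

lemma stepA_none (j : Int) (x : Int) (xs : List Int) (c : Option Int) :
    (x :: xs).foldl (stepA j) (0, none, c) = (x + xs.sum, some (mps 0 x xs), some j) := by
  rw [List.foldl_cons]
  have h1 : stepA j (0, none, c) x = (x, some x, some j) := by simp [stepA]
  rw [h1, stepA_some]
  cases xs with
  | nil => simp [mps?, mps, psFrom]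
  | cons y ys =>
    have hx : mps 0 x (y :: ys) = max x (mps x y ys) := by
      have := mps_cons 0 x y ys
      simpa using this
    simp only [mps?, Option.getD_some, ite_self, hx]

-- A's outer loop, once each column step is known, is the selection selRef
lemma outer_sel (S : Int → Int) (step : Option Int × Option Int → Int → Option Int × Option Int)
    (hstep : ∀ (b : Int) (c : Option Int) (j : Int),
      step (some b, c) j = (some (max b (S j)), if b < S j then some j else c))
    (js : List Int) : ∀ (b c0 : Int),
    js.foldl step (some b, some c0)
      = (some (selRef b c0 (js.map fun j => (j, S j))).1,
         some (selRef b c0 (js.map fun j => (j, S j))).2) := by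
  induction js with
  | nil => intro b c0; simp [selRef]
  | cons j js ih =>
    intro b c0
    rw [List.foldl_cons, hstep, List.map_cons]
    by_cases hb : b < S j
    · rw [if_pos hb, max_eq_right hb.le]
      simpa [selRef, hb] using ih (S j) j
    · rw [if_neg hb, max_eq_left (not_lt.mp hb)]
      simpa [selRef, hb] using ih b c0

lemma index?_append_left {α : Type} [BEq α] [LawfulBEq α] (l1 l2 : List α) (x : α) (c : Nat)
    (h : PySem.List.index? l1 x = some c) : PySem.List.index? (l1 ++ l2) x = some c := by
  rw [PySem.List.index?_eq_idxOf?] at h ⊢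
  unfold List.idxOf? at *
  rw [List.findIdx?_append, h]
  rfl

-- first-wins selection over consecutively indexed scores is index-of-max
lemma sel_arg (vs : List Int) : ∀ (pre : List Int) (b : Int) (c0 : Nat),
    (∀ x ∈ pre, x ≤ b) → PySem.List.index? pre b = some c0 →
    selRef b (c0 : Int) (pairsFrom (pre.length : Int) vs)
      = (vs.foldl max b,
         (((PySem.List.index? (pre ++ vs) (vs.foldl max b)).getD 0 : Nat) : Int)) := by
  induction vs with
  | nil =>
    intro pre b c0 hub hidx
    rw [PySem.List.index?_eq_idxOf?] at hidx
    simp [pairsFrom, selRef, PySem.List.index?_eq_idxOf?, hidx]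
  | cons v vs ih =>
    intro pre b c0 hub hidx
    rw [pairsFrom, selRef.eq_def]
    simp only
    by_cases hb : b < v
    · rw [if_pos hb]
      have hnotin : v ∉ pre := fun hv => absurd hb (not_lt.mpr (hub v hv))
      have hidx' : PySem.List.index? (pre ++ [v]) v = some pre.length :=
        PySem.List.index?_append_singleton_self pre v hnotin
      have hub' : ∀ x ∈ pre ++ [v], x ≤ v := by
        intro x hx
        rcases List.mem_append.mp hx with hx | hx
        · exact (hub x hx).trans hb.le
        · simp at hx; omega
      have := ih (pre ++ [v]) v pre.length hub' hidx'
      rw [List.length_append, List.length_singleton] at this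
      push_cast at this
      rw [this]
      rw [List.foldl_cons, max_eq_right hb.le, List.append_assoc]
      rfl
    · rw [if_neg hb]
      have hidx' : PySem.List.index? (pre ++ [v]) b = some c0 := index?_append_left _ _ _ _ hidx
      have hub' : ∀ x ∈ pre ++ [v], x ≤ b := by
        intro x hx
        rcases List.mem_append.mp hx with hx | hx
        · exact hub x hx
        · simp at hx; omega
      have := ih (pre ++ [v]) b c0 hub' hidx'
      rw [List.length_append, List.length_singleton] at this
      push_cast at this
      rw [this]
      rw [List.foldl_cons, max_eq_left (not_lt.mp hb), List.append_assoc]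
      rfl

lemma pairs_align (S : Int → Int) : ∀ (n : Nat) (k : Int),
    (PySem.List.pyRange k (k + n) 1).map (fun j => (j, S j))
      = pairsFrom k ((List.range n).map (fun i : Nat => S (k + (i : Int)))) := by
  intro n
  induction n with
  | zero => intro k; simp [PySem.List.pyRange_one_eq_nil (le_refl k), pairsFrom]
  | succ n ih =>
    intro k
    rw [PySem.List.pyRange_one_cons (by omega), List.map_cons,
      List.range_succ_eq_map, List.map_cons, List.map_map, pairsFrom]
    congr 1
    · simp
    · have := ih (k + 1)
      rw [show k + 1 + (n : Int) = k + ((n : Nat) + 1 : Nat) by push_cast; ring] at this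
      rw [this]
      congr 1
      apply List.map_congr_left
      intro i _
      simp only [Function.comp_apply, Nat.succ_eq_add_one]
      congr 1
      push_cast
      ring

-- ===== B-side lemmas: the vector fold is the columnwise scalar fold =====

-- scalar per-column step: (running sum, running max)
def colFold (t m : Int) (xs : List Int) : Int × Int :=
  xs.foldl (fun (p : Int × Int) x => (p.1 + x, max p.2 (p.1 + x))) (t, m)

lemma colFold_snd (xs : List Int) : ∀ t m : Int,
    (colFold t m xs).2 = max m ((mps? t xs).getD m) := by
  induction xs with
  | nil => intro t m; simp [colFold, mps?]
  | cons x xs ih =>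
    intro t m
    have hstep : colFold t m (x :: xs) = colFold (t + x) (max m (t + x)) xs := by
      simp [colFold]
    rw [hstep, ih]
    cases xs with
    | nil => simp [mps?, mps, psFrom]
    | cons y ys =>
      simp only [mps?, Option.getD_some, mps_cons]
      rw [max_assoc]

-- a zip-comprehension over a range-indexed vector, pointwise
lemma zip_map_range (op : Int → Int → Int) (f : Nat → Int) (r : List Int) (w : Nat)
    (h : w ≤ r.length) :
    ((((List.range w).map f).zip r).map (fun q => op q.1 q.2))
      = (List.range w).map (fun i => op (f i) (r.getD i 0)) := by
  apply List.ext_getElem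
  · simp; omega
  · intro i h1 h2
    have hi : i < w := by simpa using h2
    have hir : i < r.length := lt_of_lt_of_le hi h
    simp [List.getElem_zip, List.getD_eq_getElem?_getD, List.getElem?_eq_getElem hir]

-- B's row loop equals the per-column scalar folds, componentwise
lemma vec_fold (rs : List (List Int)) : ∀ (f g : Nat → Int) (w : Nat),
    (∀ r ∈ rs, w ≤ r.length) →
    rs.foldl stepB ((List.range w).map f, (List.range w).map g)
      = ((List.range w).map (fun i => (colFold (f i) (g i) (rs.map fun r => r.getD i 0)).1),
         (List.range w).map (fun i => (colFold (f i) (g i) (rs.map fun r => r.getD i 0)).2)) := by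
  induction rs with
  | nil => intro f g w _; simp [colFold]
  | cons r rs ih =>
    intro f g w hlen
    have hr : w ≤ r.length := hlen r (by simp)
    have hstep : stepB ((List.range w).map f, (List.range w).map g) r
        = ((List.range w).map (fun i => f i + r.getD i 0),
           (List.range w).map (fun i => max (g i) (f i + r.getD i 0))) := by
      unfold stepB
      simp only
      rw [zip_map_range (fun a b => a + b) f r w hr]
      rw [zip_map_range (fun a b => max a b) g _ w (by simp)]
      congr 1
      apply List.map_congr_left
      intro i hi
      have hi' : i < w := List.mem_range.mp hi
      congr 1
      rw [List.getD_eq_getElem?_getD]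
      simp [hi']
    rw [List.foldl_cons, hstep, ih _ _ w (fun r' hr' => hlen r' (by simp [hr']))]
    have hcol : ∀ (i : Nat),
        colFold (f i + r.getD i 0) (max (g i) (f i + r.getD i 0)) (rs.map fun r' => r'.getD i 0)
          = colFold (f i) (g i) (((r :: rs).map fun r' => r'.getD i 0)) := by
      intro i
      simp [colFold]
    simp only [hcol]

-- a list is the range-indexed map of its own entries
lemma self_map_range (r : List Int) :
    r = (List.range r.length).map (fun i => r.getD i 0) := by
  apply List.ext_getElem
  · simp
  · intro i h1 h2
    simp [List.getD_eq_getElem?_getD, List.getElem?_eq_getElem h1]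

lemma main_equiv (r0 : List Int) (rest : List (List Int)) (hh : r0 ≠ [])
    (hlen : ∀ r ∈ r0 :: rest, r0.length ≤ r.length) :
    top_column (r0 :: rest) = top_column_alt (r0 :: rest) := by
  obtain ⟨cm, hcm⟩ : ∃ cm, r0.length = cm + 1 := by
    rcases r0 with _ | ⟨x, xs⟩
    · simp at hh
    · exact ⟨xs.length, rfl⟩
  set S : Int → Int := fun j =>
    mps 0 (PySem.List.pyGetD r0 j 0) (rest.map fun r => PySem.List.pyGetD r j 0) with hS
  -- the outer-loop body of A, applied to a state with a `some` best, is a selRef step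
  have hinner : ∀ (st : Option Int × Option Int) (col : Int),
      (PySem.List.pyRange 0 (((r0 :: rest)).length : Int) 1).foldl
        (fun (p : Int × Option Int × Option Int) row =>
          let total := p.1 + PySem.List.pyGetD (PySem.List.pyGetD (r0 :: rest) row []) col 0
          match p.2.1 with
          | none => (total, some total, some col)
          | some b => if b < total then (total, some total, some col) else (total, some b, p.2.2))
        (0, st.1, st.2)
      = ((PySem.List.pyGetD r0 col 0 :: rest.map fun r => PySem.List.pyGetD r col 0).foldl
          (stepA col) (0, st.1, st.2)) := by
    intro st col
    have h1 := PySem.List.foldl_pyRange_zero_pyGetD' (r0 :: rest) []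
      (fun p r => stepA col p (PySem.List.pyGetD r col 0)) (0, st.1, st.2)
    have h2 : ((r0 :: rest).map (fun r => PySem.List.pyGetD r col 0)).foldl (stepA col) (0, st.1, st.2)
        = (r0 :: rest).foldl (fun p r => stepA col p (PySem.List.pyGetD r col 0)) (0, st.1, st.2) :=
      List.foldl_map ..
    rw [List.map_cons] at h2
    rw [h2, ← h1]
    rfl
  set step' : Option Int × Option Int → Int → Option Int × Option Int := fun st col =>
    ((PySem.List.pyGetD r0 col 0 :: rest.map fun r => PySem.List.pyGetD r col 0).foldl
      (stepA col) (0, st.1, st.2)).2 with hstep'def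
  have houter : ∀ (js : List Int) (st : Option Int × Option Int),
      js.foldl
        (fun (st : Option Int × Option Int) col =>
          let r := (PySem.List.pyRange 0 (((r0 :: rest)).length : Int) 1).foldl
            (fun (p : Int × Option Int × Option Int) row =>
              let total := p.1 + PySem.List.pyGetD (PySem.List.pyGetD (r0 :: rest) row []) col 0
              match p.2.1 with
              | none => (total, some total, some col)
              | some b => if b < total then (total, some total, some col) else (total, some b, p.2.2))
            (0, st.1, st.2)
          (r.2.1, r.2.2)) st
      = js.foldl step' st := by
    intro js st
    apply PySem.List.foldl_congr_mem
    intro acc x _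
    simp only
    rw [hinner]
  have hstep : ∀ (b : Int) (c : Option Int) (j : Int),
      step' (some b, c) j = (some (max b (S j)), if b < S j then some j else c) := by
    intro b c j
    rw [hstep'def]
    simp only
    rw [stepA_some]
    simp [mps?, hS]
  have hfirst : step' (none, none) 0 = (some (S 0), some 0) := by
    rw [hstep'def]
    simp only
    rw [stepA_none]
  have hposlen : (0 : Int) < (r0.length : Int) := by rw [hcm]; push_cast; omega
  have hA : top_column (r0 :: rest)
      = (selRef (S 0) 0 ((PySem.List.pyRange 1 (r0.length : Int) 1).map fun j => (j, S j))).2 := by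
    unfold top_column
    simp only [PySem.List.pyGet?_zero_cons, Option.getD_some]
    rw [houter, PySem.List.pyRange_one_cons hposlen, List.foldl_cons, hfirst,
      outer_sel S step' hstep]
    simp
  -- pairs and selection
  set vs : List Int := (List.range cm).map (fun i : Nat => S (1 + (i : Int))) with hvs
  have hpairs : (PySem.List.pyRange 1 (r0.length : Int) 1).map (fun j => (j, S j))
      = pairsFrom 1 vs := by
    have := pairs_align S cm 1
    rw [show (1 : Int) + (cm : Int) = ((r0.length : Nat) : Int) by rw [hcm]; push_cast; ring] at this
    exact this
  have hsel : selRef (S 0) 0 (pairsFrom 1 vs)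
      = (vs.foldl max (S 0),
         (((PySem.List.index? ([S 0] ++ vs) (vs.foldl max (S 0))).getD 0 : Nat) : Int)) := by
    have := sel_arg vs [S 0] (S 0) 0
      (by intro x hx; simp at hx; omega)
      (PySem.List.index?_cons_self _ _)
    simpa using this
  -- B side: the row loop yields the per-column maxima vector [S 0] ++ vs
  have hB : top_column_alt (r0 :: rest)
      = (((PySem.List.index? ([S 0] ++ vs) (vs.foldl max (S 0))).getD 0 : Nat) : Int) := by
    unfold top_column_alt
    simp only [PySem.List.pyGet?_zero_cons, Option.getD_some]
    rw [if_neg (by simp [List.isEmpty_iff, hh]), PySem.List.slice_from_one]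
    simp only [List.tail_cons]
    have hrowlen : ∀ r ∈ rest, r0.length ≤ r.length := fun r hr => hlen r (by simp [hr])
    have hinit := self_map_range r0
    conv_lhs => rw [hinit]
    rw [vec_fold rest (fun i => r0.getD i 0) (fun i => r0.getD i 0) r0.length hrowlen]
    simp only
    have hbests : (List.range r0.length).map
        (fun i => (colFold (r0.getD i 0) (r0.getD i 0) (rest.map fun r => r.getD i 0)).2)
        = [S 0] ++ vs := by
      have hpt : ∀ i : Nat,
          (colFold (r0.getD i 0) (r0.getD i 0) (rest.map fun r => r.getD i 0)).2
            = S (i : Int) := by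
        intro i
        rw [colFold_snd, hS]
        simp only [PySem.List.pyGetD_natCast]
        exact (mps_zero _ _).symm
      simp only [hpt]
      rw [hcm, List.range_succ_eq_map, List.map_cons, List.map_map]
      congr 1
      rw [hvs]
      apply List.map_congr_left
      intro i _
      simp only [Function.comp_apply]
      congr 1
      push_cast
      ring
    rw [hbests]
    have : ([S 0] ++ vs) = S 0 :: vs := by simp
    rw [this, PySem.List.max?_id_cons]
    simp
  rw [hA, hpairs, hsel, hB]

-- ===== VERDICT (by name: the statement is the Claim_ definition above) =====
theorem top_column_spec : Claim_equal_top_column := by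
  unfold Claim_equal_top_column
  intro matrix _hdom hpre
  obtain ⟨hne, hh, hlen⟩ := hpre
  rcases matrix with _ | ⟨r0, rest⟩
  · exact absurd rfl hne
  simp only [List.headD_cons] at hh hlen
  exact main_equiv r0 rest hh hlen
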